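-- pv_equiv track=rewrite | github.com/sarptandoven/python-sdk-to-mcp-converter | executor.py | _is_retryable
-- ===== SOURCE A (Python) =====
-- def _is_retryable(error):
--     """check if error should be retried."""
--     error_str = str(error).lower()
--     retryable_patterns = [
--         "timeout",
--         "connection",
--         "network",
--         "temporarily unavailable",
--         "rate limit",
--         "too many requests",
--         "503",
--         "429"
--     ]
--
--     return any(pattern in error_str for pattern in retryable_patterns)
-- ===== SOURCE B (Python) =====
-- def _is_retryable(error):
--     """check if error should be retried."""
--     s = str(error).lower()
--     patterns = (
--         "timeout",
--         "connection",
--         "network",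
--         "temporarily unavailable",
--         "rate limit",
--         "too many requests",
--         "503",
--         "429",
--     )
--     # single left-to-right pass over positions instead of one substring scan per pattern
--     for i in range(len(s)):
--         for p in patterns:
--             if s.startswith(p, i):
--                 return True
--     return False
-- ===== Notes on version B (the rewrite author's own statement) =====
-- stated objective: alternative
-- what changed: Replaced the per-pattern substring-containment scan with a single left-to-right pass over string positions, testing at each position whether any pattern starts there.
import Mathlib
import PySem

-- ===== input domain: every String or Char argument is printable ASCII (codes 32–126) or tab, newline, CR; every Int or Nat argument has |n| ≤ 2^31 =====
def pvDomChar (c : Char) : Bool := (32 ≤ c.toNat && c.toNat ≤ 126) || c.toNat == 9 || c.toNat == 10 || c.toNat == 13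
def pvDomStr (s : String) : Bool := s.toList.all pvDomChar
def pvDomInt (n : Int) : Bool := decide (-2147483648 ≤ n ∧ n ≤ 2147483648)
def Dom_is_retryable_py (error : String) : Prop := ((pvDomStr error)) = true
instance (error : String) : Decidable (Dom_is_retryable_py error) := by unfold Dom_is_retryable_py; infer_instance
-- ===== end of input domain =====

-- B replaces A's per-pattern substring scan with a single left-to-right pass over positions
-- checking each pattern as a prefix there (alternative decomposition, same cost class).


-- ===== PORT A =====
def pvPatterns : List String :=
  ["timeout", "connection", "network", "temporarily unavailable",
   "rate limit", "too many requests", "503", "429"]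

def is_retryable_py (error : String) : Bool :=
  let error_str := PySem.Str.lower error
  pvPatterns.any (fun pattern => PySem.Str.isIn pattern error_str)

-- ===== PORT B =====
-- the position loop of Source B: at each suffix, test every pattern as a prefix
def pvScan (pats : List (List Char)) : List Char → Bool
  | [] => false
  | c :: rest =>
    if pats.any (fun p => PySem.Chars.startswith (c :: rest) p) then true
    else pvScan pats rest

def is_retryable_py_alt (error : String) : Bool :=
  let s := (PySem.Str.lower error).toList
  pvScan (pvPatterns.map String.toList) s

-- ===== PRECONDITION & SPEC =====
def Spec_is_retryable_py (error : String) (out : Bool) : Prop := out = is_retryable_py_alt error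
instance (error : String) (out : Bool) : Decidable (Spec_is_retryable_py error out) := by unfold Spec_is_retryable_py; infer_instance

-- ===== CLAIM (what is proved, stated in full; the proofs are below) =====
def Claim_equal_is_retryable_py : Prop := ∀ (error : String), Dom_is_retryable_py error → Spec_is_retryable_py error (is_retryable_py error)

-- ===== LEMMAS AND PROOFS =====

-- the position scan decides exactly "some pattern occurs as an infix", for nonempty patterns
theorem pvScan_eq_any_isIn (pats : List (List Char)) (hne : ∀ p ∈ pats, p ≠ [])
    (s : List Char) : pvScan pats s = pats.any (fun p => PySem.Chars.isIn p s) := by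
  induction s with
  | nil =>
    rw [Bool.eq_iff_iff]
    constructor
    · intro h; exact absurd h (by simp [pvScan])
    · intro h
      obtain ⟨p, hp, hin⟩ := List.any_eq_true.mp h
      rw [PySem.Chars.isIn_iff_infix] at hin
      exact absurd (List.eq_nil_of_infix_nil hin) (hne p hp)
  | cons c rest ih =>
    rw [pvScan, ih, Bool.eq_iff_iff]
    by_cases h : pats.any (fun p => PySem.Chars.startswith (c :: rest) p) = true
    · rw [if_pos h]
      refine ⟨fun _ => ?_, fun _ => rfl⟩
      obtain ⟨p, hp, hsw⟩ := List.any_eq_true.mp h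
      rw [PySem.Chars.startswith_iff] at hsw
      exact List.any_eq_true.mpr ⟨p, hp,
        (PySem.Chars.isIn_iff_infix p (c :: rest)).mpr hsw.isInfix⟩
    · rw [if_neg h]
      constructor
      · intro hrest
        obtain ⟨p, hp, hin⟩ := List.any_eq_true.mp hrest
        rw [PySem.Chars.isIn_iff_infix] at hin
        exact List.any_eq_true.mpr ⟨p, hp, (PySem.Chars.isIn_iff_infix p (c :: rest)).mpr
          (hin.trans (List.suffix_cons c rest).isInfix)⟩
      · intro hcons
        obtain ⟨p, hp, hin⟩ := List.any_eq_true.mp hcons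
        rw [PySem.Chars.isIn_iff_infix, List.infix_cons_iff] at hin
        rcases hin with hpre | hinf
        · exact absurd (List.any_eq_true.mpr ⟨p, hp,
            (PySem.Chars.startswith_iff _ _).mpr hpre⟩) h
        · exact List.any_eq_true.mpr ⟨p, hp, (PySem.Chars.isIn_iff_infix p rest).mpr hinf⟩

-- ===== VERDICT (by name: the statement is the Claim_ definition above) =====
theorem is_retryable_py_spec : Claim_equal_is_retryable_py := by
  intro error _
  unfold Spec_is_retryable_py is_retryable_py is_retryable_py_alt
  rw [pvScan_eq_any_isIn _ (by decide)]
  simp [pvPatterns, PySem.Str.isIn_eq]
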